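-- pv_equiv track=rewrite | github.com/talloway/pitt | 3_summer20/coe1530/CrossFilmz/crossfilmz-app/src/components/backend/user.py | format_recs
-- ===== SOURCE A (Python) =====
-- def format_recs(recs):
--     new_recs = []
--
--     for key in recs:
--         for rec in recs[key]:
--             if rec not in new_recs:
--                 new_recs.append(rec)
--
--     new_recs = sorted(new_recs, key=lambda x: x[1], reverse=True)
--     return new_recs
-- ===== SOURCE B (Python) =====
-- def format_recs(recs):
--     # Group recs into score buckets (dedupe within a bucket suffices: equal
--     # recs always share a score), then emit buckets by descending score.
--     buckets = {}
--     for value in recs.values():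
--         for rec in value:
--             bucket = buckets.setdefault(rec[1], [])
--             if rec not in bucket:
--                 bucket.append(rec)
--     out = []
--     for score in sorted(buckets, reverse=True):
--         out.extend(buckets[score])
--     return out
-- ===== Notes on version B (the rewrite author's own statement) =====
-- stated objective: alternative
-- what changed: A dedupes all recs into one global list (scanning the whole result list per element) and then sorts the recs themselves; B never sorts recs and keeps no global list: it groups recs into per-score dict buckets (deduping only within a bucket, since equal recs always share a score) and concatenates the buckets along the sorted distinct scores in descending order.
import Mathlib
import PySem

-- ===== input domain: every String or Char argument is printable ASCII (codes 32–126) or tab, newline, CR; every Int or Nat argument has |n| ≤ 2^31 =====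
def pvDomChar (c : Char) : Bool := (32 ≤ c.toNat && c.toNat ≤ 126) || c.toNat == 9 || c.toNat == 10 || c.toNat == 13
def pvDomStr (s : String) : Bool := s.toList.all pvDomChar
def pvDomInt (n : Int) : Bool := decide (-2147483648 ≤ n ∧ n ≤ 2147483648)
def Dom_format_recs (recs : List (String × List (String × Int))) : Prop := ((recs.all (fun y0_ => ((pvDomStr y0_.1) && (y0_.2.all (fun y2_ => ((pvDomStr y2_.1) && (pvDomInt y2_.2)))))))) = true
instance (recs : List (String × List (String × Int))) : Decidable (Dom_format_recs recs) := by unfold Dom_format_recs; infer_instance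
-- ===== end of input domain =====

-- B replaces A's global dedupe-then-sort with a group-by: recs are bucketed by score in a dict
-- (deduped only inside their bucket — equal recs share a score), and the buckets are emitted in
-- descending order of the sorted distinct scores; same return value.

-- ===== PORT A =====
-- `recs` is a Python dict: the assoc-list argument is normalised with PySem.Dict.ofList
-- (insertion order, a duplicate key overwrites in place), then A's two nested loops run over it.
def format_recs (recs : List (String × List (String × Int))) : List (String × Int) :=
  PySem.List.sorted
    ((PySem.Dict.keys (PySem.Dict.ofList recs)).foldl
      (fun new_recs key =>
        (PySem.Dict.getD (PySem.Dict.ofList recs) key []).foldl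
          (fun new_recs rec => if rec ∈ new_recs then new_recs else new_recs ++ [rec])
          new_recs)
      [])
    (fun x => x.2) true

-- ===== PORT B =====
-- Python's `bucket = buckets.setdefault(rec[1], [])` followed by in-place `bucket.append(rec)`
-- mutates the dict entry through the alias: ported exactly as Dict.modify with default [].
def format_recs_alt (recs : List (String × List (String × Int))) : List (String × Int) :=
  let buckets : PySem.Dict Int (List (String × Int)) :=
    (PySem.Dict.values (PySem.Dict.ofList recs)).foldl
      (fun buckets value =>
        value.foldl
          (fun buckets rec =>
            PySem.Dict.modify buckets rec.2 []
              (fun bucket => if rec ∈ bucket then bucket else bucket ++ [rec]))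
          buckets)
      PySem.Dict.empty
  (PySem.List.sorted (PySem.Dict.keys buckets) (fun score => score) true).foldl
    (fun out score => out ++ PySem.Dict.getD buckets score []) []

-- ===== PRECONDITION & SPEC =====
def Spec_format_recs (recs : List (String × List (String × Int))) (out : List (String × Int)) : Prop := out = format_recs_alt recs
instance (recs : List (String × List (String × Int))) (out : List (String × Int)) : Decidable (Spec_format_recs recs out) := by unfold Spec_format_recs; infer_instance

-- ===== CLAIM (what is proved, stated in full; the proofs are below) =====
def Claim_equal_format_recs : Prop := ∀ (recs : List (String × List (String × Int))), Dom_format_recs recs → Spec_format_recs recs (format_recs recs)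

-- ===== LEMMAS AND PROOFS =====

-- the flattened stream of recs both programs consume, in order
def flatRecs (recs : List (String × List (String × Int))) : List (String × Int) :=
  (PySem.Dict.values (PySem.Dict.ofList recs)).flatMap (fun value => value)

-- A's membership-guarded append is the seen-set step
theorem foldl_append_if_mem_eq_add (l : List (String × Int)) (init : List (String × Int)) :
    l.foldl (fun acc rec => if rec ∈ acc then acc else acc ++ [rec]) init =
      l.foldl PySem.Set.add init := by
  apply PySem.List.foldl_congr_mem
  intro acc r _
  by_cases h : r ∈ acc
  · simp [PySem.Set.add, PySem.Set.contains, h]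
  · simp [PySem.Set.add, PySem.Set.contains, h]

-- A's nested key loop builds the ordered dedup of the flattened stream
theorem a_loop_eq (recs : List (String × List (String × Int))) :
    format_recs recs =
      PySem.List.sorted (PySem.Set.ofList (flatRecs recs)) (fun x => x.2) true := by
  unfold format_recs
  congr 1
  have hkeys :
      (PySem.Dict.keys (PySem.Dict.ofList recs)).foldl
        (fun acc key => (PySem.Dict.getD (PySem.Dict.ofList recs) key []).foldl
          (fun acc rec => if rec ∈ acc then acc else acc ++ [rec]) acc) []
      = (PySem.Dict.ofList recs).items.foldl
        (fun acc kv => kv.2.foldl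
          (fun acc rec => if rec ∈ acc then acc else acc ++ [rec]) acc) [] := by
    rw [PySem.Dict.keys, List.foldl_map]
    apply PySem.List.foldl_congr_mem
    intro acc kv hkv
    rw [PySem.Dict.getD_of_mem_items (PySem.Dict.ofList recs)
      (by exact hkv) (PySem.Dict.nodup_keys_ofList recs)]
  rw [hkeys, PySem.Set.ofList_eq_foldl]
  have hflat : flatRecs recs
      = ((PySem.Dict.ofList recs).items.map (fun kv => kv.2)).flatten := by
    simp [flatRecs, PySem.Dict.values]
  rw [hflat, List.foldl_flatten, List.foldl_map]
  apply PySem.List.foldl_congr_mem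
  intro acc kv _
  exact foldl_append_if_mem_eq_add kv.2 acc

theorem ofList_append_singleton (l : List (String × Int)) (x : String × Int) :
    PySem.Set.ofList (l ++ [x]) = PySem.Set.add (PySem.Set.ofList l) x := by
  simp [PySem.Set.ofList_eq_foldl, List.foldl_append]

-- ordered dedup commutes with filtering
theorem ofList_filter (p : (String × Int) → Bool) (l : List (String × Int)) :
    (PySem.Set.ofList l).filter p = PySem.Set.ofList (l.filter p) := by
  induction l using List.reverseRecOn with
  | nil => rfl
  | append_singleton l x ih =>
    rw [ofList_append_singleton]
    by_cases hp : p x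
    · rw [show (l ++ [x]).filter p = l.filter p ++ [x] by simp [List.filter_append, hp],
        ofList_append_singleton]
      by_cases hx : x ∈ l
      · have hc : PySem.Set.contains (PySem.Set.ofList l) x = true := by
          simp [PySem.Set.contains, (PySem.Set.mem_ofList l x).mpr hx]
        rw [show PySem.Set.add (PySem.Set.ofList l) x = PySem.Set.ofList l by
          unfold PySem.Set.add; rw [hc]; simp]
        have hxf : x ∈ l.filter p := List.mem_filter.mpr ⟨hx, hp⟩
        have hcf : PySem.Set.contains (PySem.Set.ofList (l.filter p)) x = true := by
          simp [PySem.Set.contains, (PySem.Set.mem_ofList _ x).mpr hxf]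
        rw [show PySem.Set.add (PySem.Set.ofList (l.filter p)) x = PySem.Set.ofList (l.filter p) by
          unfold PySem.Set.add; rw [hcf]; simp]
        exact ih
      · have hc : PySem.Set.contains (PySem.Set.ofList l) x = false := by
          simp [PySem.Set.contains, PySem.Set.mem_ofList, hx]
        rw [show PySem.Set.add (PySem.Set.ofList l) x = PySem.Set.ofList l ++ [x] by
          unfold PySem.Set.add; rw [hc]; simp]
        have hxf : x ∉ l.filter p := fun h => hx (List.mem_of_mem_filter h)
        have hcf : PySem.Set.contains (PySem.Set.ofList (l.filter p)) x = false := by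
          simp [PySem.Set.contains, PySem.Set.mem_ofList, hxf]
        rw [show PySem.Set.add (PySem.Set.ofList (l.filter p)) x = PySem.Set.ofList (l.filter p) ++ [x] by
          unfold PySem.Set.add; rw [hcf]; simp]
        simp [hp, ih]
    · rw [show (l ++ [x]).filter p = l.filter p by simp [List.filter_append, hp]]
      by_cases hx : x ∈ l
      · have hc : PySem.Set.contains (PySem.Set.ofList l) x = true := by
          simp [PySem.Set.contains, (PySem.Set.mem_ofList l x).mpr hx]
        rw [show PySem.Set.add (PySem.Set.ofList l) x = PySem.Set.ofList l by
          unfold PySem.Set.add; rw [hc]; simp]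
        exact ih
      · have hc : PySem.Set.contains (PySem.Set.ofList l) x = false := by
          simp [PySem.Set.contains, PySem.Set.mem_ofList, hx]
        rw [show PySem.Set.add (PySem.Set.ofList l) x = PySem.Set.ofList l ++ [x] by
          unfold PySem.Set.add; rw [hc]; simp]
        simp [hp, ih]

-- the bucket a score owns after B's grouping loop: the guarded-append fold of the score's recs
theorem bucket_getD (s : Int) (l : List (String × Int)) :
    ∀ (d : PySem.Dict Int (List (String × Int))),
    PySem.Dict.getD
      (l.foldl (fun d z => PySem.Dict.modify d z.2 []
        (fun b => if z ∈ b then b else b ++ [z])) d) s []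
    = (l.filter (fun z => decide (z.2 = s))).foldl
        (fun b z => if z ∈ b then b else b ++ [z]) (PySem.Dict.getD d s []) := by
  induction l with
  | nil => intro d; simp
  | cons z l ih =>
    intro d
    simp only [List.foldl_cons, List.filter_cons]
    rw [ih]
    by_cases hz : z.2 = s
    · simp only [hz, decide_true, if_true, List.foldl_cons]
      congr 1
      rw [PySem.Dict.getD_modify, if_pos rfl]
    · simp only [hz, decide_false]
      congr 1
      rw [PySem.Dict.getD_modify, if_neg (fun h => hz h.symm)]

-- B's grouping loop keys: the distinct scores, in first-appearance order
theorem keys_buckets (l : List (String × Int)) :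
    (l.foldl (fun d z => PySem.Dict.modify d z.2 []
      (fun b => if z ∈ b then b else b ++ [z])) PySem.Dict.empty).keys
    = PySem.Set.ofList (l.map (fun z => z.2)) := by
  have h := PySem.Dict.keys_foldl_modify_key l (fun z => z.2) ([] : List (String × Int))
    (fun _ z => fun b => if z ∈ b then b else b ++ [z]) PySem.Dict.empty
  simpa using h

-- inserting x before nothing but elements it precedes
theorem insertBy_of_forall_before {α : Type} (b : α → α → Bool) (x : α) (v : List α)
    (h : ∀ c ∈ v, b x c = true) : PySem.List.insertBy b x v = x :: v := by
  cases v with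
  | nil => simp [PySem.List.insertBy]
  | cons c t => simp [PySem.List.insertBy, h c List.mem_cons_self]

theorem insertBy_append_skip {α : Type} (b : α → α → Bool) (x : α) :
    ∀ (u v : List α), (∀ c ∈ u, b x c = false) →
      PySem.List.insertBy b x (u ++ v) = u ++ PySem.List.insertBy b x v := by
  intro u
  induction u with
  | nil => simp
  | cons c t ih =>
    intro v h
    have hc := h c List.mem_cons_self
    simp only [List.cons_append, PySem.List.insertBy, hc, Bool.false_eq_true, if_false]
    rw [ih v (fun y hy => h y (List.mem_cons_of_mem _ hy))]

-- inserting one rec into a concatenation of strictly score-descending blocks appends it to its block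
theorem insertBy_blocks (x : String × Int) :
    ∀ (ss : List Int) (f : Int → List (String × Int)),
      ss.Pairwise (fun a b => b < a) → x.2 ∈ ss → (∀ s ∈ ss, ∀ z ∈ f s, z.2 = s) →
      PySem.List.insertBy (fun a c => decide (c.2 < a.2)) x (ss.flatMap f)
        = ss.flatMap (fun s => if s = x.2 then f s ++ [x] else f s) := by
  intro ss
  induction ss with
  | nil => intro f _ hx _; cases hx
  | cons s t ih =>
    intro f hp hx hf
    rw [List.flatMap_cons, List.flatMap_cons]
    by_cases hs : s = x.2
    · subst hs
      rw [insertBy_append_skip _ x (f x.2) (t.flatMap f)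
        (by
          intro c hc
          rw [hf x.2 List.mem_cons_self c hc]
          simp)]
      rw [insertBy_of_forall_before _ x (t.flatMap f)
        (by
          intro c hc
          rcases List.mem_flatMap.mp hc with ⟨s', hs', hc'⟩
          rw [hf s' (List.mem_cons_of_mem _ hs') c hc']
          exact decide_eq_true ((List.pairwise_cons.mp hp).1 s' hs'))]
      have ht : t.flatMap (fun s' => if s' = x.2 then f s' ++ [x] else f s') = t.flatMap f := by
        refine List.flatMap_congr (fun s' hs' => ?_)
        have : s' < x.2 := (List.pairwise_cons.mp hp).1 s' hs'
        rw [if_neg (ne_of_lt this)]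
      rw [if_pos rfl, ht]
      simp
    · have hx' : x.2 ∈ t := (List.mem_cons.mp hx).resolve_left (fun h => hs h.symm)
      rw [insertBy_append_skip _ x (f s) (t.flatMap f)
        (by
          intro c hc
          rw [hf s List.mem_cons_self c hc]
          have : x.2 < s := (List.pairwise_cons.mp hp).1 x.2 hx'
          simp [not_lt_of_gt this])]
      rw [ih f (List.pairwise_cons.mp hp).2 hx'
        (fun s' hs' => hf s' (List.mem_cons_of_mem _ hs'))]
      rw [if_neg hs]

-- one appended element through the stable reverse sort
theorem sorted_rev_append_singleton (ys : List (String × Int)) (x : String × Int) :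
    PySem.List.sorted (ys ++ [x]) (fun p => p.2) true =
      PySem.List.insertBy (fun a c => decide (c.2 < a.2)) x
        (PySem.List.sorted ys (fun p => p.2) true) := by
  rw [PySem.List.sorted_rev_eq_foldl_insertBy (ys ++ [x]) (fun p => p.2),
    PySem.List.sorted_rev_eq_foldl_insertBy ys (fun p => p.2), List.foldl_append]
  simp

-- THE DECOMPOSITION: the stable reverse sort by score is the concatenation of the
-- score-filtered blocks, taken along any strictly descending list covering all scores
theorem sorted_rev_eq_blocks (l : List (String × Int)) :
    ∀ (ss : List Int), ss.Pairwise (fun a b => b < a) → (∀ z ∈ l, z.2 ∈ ss) →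
    PySem.List.sorted l (fun z => z.2) true
      = ss.flatMap (fun s => l.filter (fun z => decide (z.2 = s))) := by
  induction l using List.reverseRecOn with
  | nil =>
    intro ss _ _
    rw [PySem.List.sorted_rev_eq_foldl_insertBy]
    simp
  | append_singleton l x ih =>
    intro ss hp hmem
    rw [sorted_rev_append_singleton,
      ih ss hp (fun z hz => hmem z (List.mem_append_left _ hz)),
      insertBy_blocks x ss _ hp (hmem x (List.mem_append_right _ List.mem_cons_self))
        (fun s _ z hz => of_decide_eq_true (List.mem_filter.mp hz).2)]
    refine List.flatMap_congr (fun s _ => ?_)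
    by_cases h : s = x.2
    · simp [h, List.filter_append]
    · have hx2 : ¬ (x.2 = s) := fun hh => h hh.symm
      simp [h, hx2, List.filter_append]

-- B unfolded: the descending distinct scores, each replaced by its deduped bucket
theorem b_eq (recs : List (String × List (String × Int))) :
    format_recs_alt recs =
      (PySem.List.sorted (PySem.Set.ofList ((flatRecs recs).map (fun z => z.2)))
          (fun score => score) true).flatMap
        (fun s => PySem.Set.ofList ((flatRecs recs).filter (fun z => decide (z.2 = s)))) := by
  unfold format_recs_alt
  have hnest :
      (PySem.Dict.values (PySem.Dict.ofList recs)).foldl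
        (fun buckets value =>
          value.foldl
            (fun buckets rec =>
              PySem.Dict.modify buckets rec.2 []
                (fun bucket => if rec ∈ bucket then bucket else bucket ++ [rec]))
            buckets)
        PySem.Dict.empty
      = (flatRecs recs).foldl
          (fun d z => PySem.Dict.modify d z.2 []
            (fun b => if z ∈ b then b else b ++ [z])) PySem.Dict.empty := by
    have hflat : flatRecs recs = (PySem.Dict.values (PySem.Dict.ofList recs)).flatten := by
      simp [flatRecs]
    rw [hflat, List.foldl_flatten]
  rw [hnest, PySem.List.foldl_append_eq_flatMap, keys_buckets]
  refine List.flatMap_congr (fun s _ => ?_)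
  rw [bucket_getD]
  simp only [PySem.Dict.getD_empty]
  rw [foldl_append_if_mem_eq_add, ← PySem.Set.ofList_eq_foldl]

-- ===== VERDICT (by name: the statement is the Claim_ definition above) =====
theorem format_recs_spec : Claim_equal_format_recs := by
  intro recs _
  unfold Spec_format_recs
  rw [a_loop_eq, b_eq]
  have hnd : (PySem.List.sorted (PySem.Set.ofList ((flatRecs recs).map (fun z => z.2)))
      (fun score => score) true).Nodup :=
    (PySem.List.sorted_perm _ _ true).nodup_iff.mpr (PySem.Set.nodup_ofList _)
  have hle := PySem.List.sorted_pairwise_rev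
    (PySem.Set.ofList ((flatRecs recs).map (fun z => z.2))) (fun score => score)
  have hpair : (PySem.List.sorted (PySem.Set.ofList ((flatRecs recs).map (fun z => z.2)))
      (fun score => score) true).Pairwise (fun a b => b < a) :=
    (hle.and hnd).imp (fun h => lt_of_le_of_ne h.1 (Ne.symm h.2))
  rw [sorted_rev_eq_blocks (PySem.Set.ofList (flatRecs recs)) _ hpair
    (by
      intro z hz
      rw [PySem.List.mem_sorted, PySem.Set.mem_ofList]
      exact List.mem_map_of_mem ((PySem.Set.mem_ofList _ z).mp hz))]
  exact List.flatMap_congr (fun s _ => ofList_filter _ _)
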